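-- pv_equiv track=rewrite | github.com/Sree-GMX/suitecraft-ai | backend/app/services/test_plan_ai_service.py | _generate_test_case_summary
-- ===== SOURCE A (Python) =====
-- from typing import List, Dict, Any, Optional
--
-- def _generate_test_case_summary(test_cases: List[Dict]) -> str:
--     """Generate a detailed summary of test cases organized by priority"""
--     lines = []
--
--     # Group by priority
--     priority_groups = {
--         'Critical': [],
--         'High': [],
--         'Medium': [],
--         'Low': []
--     }
--
--     for tc in test_cases:
--         priority = tc.get('priority_label', 'Medium')
--         if priority in priority_groups:
--             priority_groups[priority].append(tc)
--         else:
--             priority_groups['Medium'].append(tc)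
--
--     lines.append("### Test Cases Organized by Priority")
--     lines.append("")
--
--     # Show test cases for each priority level
--     for priority in ['Critical', 'High', 'Medium', 'Low']:
--         test_list = priority_groups[priority]
--         if test_list:
--             lines.append(f"#### {priority} Priority ({len(test_list)} test cases)")
--
--             # Show up to 8 test cases per priority
--             for tc in test_list[:8]:
--                 test_id = tc.get('id', 'N/A')
--                 title = tc.get('title', 'Untitled')[:100]
--                 section = tc.get('section_hierarchy') or tc.get('section', 'General')
--                 lines.append(f"- **[{test_id}]** {title}")
--                 lines.append(f"  📁 Section: {section}")
--
--             if len(test_list) > 8: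
--                 lines.append(f"  ... and {len(test_list) - 8} more {priority.lower()} priority test cases")
--
--             lines.append("")
--
--     # Summary
--     total = sum(len(tests) for tests in priority_groups.values())
--     lines.append(f"**Total Available Test Cases: {total}**")
--
--     return "\n".join(lines)
-- ===== SOURCE B (Python) =====
-- def _generate_test_case_summary(test_cases):
--     """Per-priority filters over the input instead of a grouping dict; total is len(test_cases)."""
--     def label(tc):
--         return tc.get('priority_label', 'Medium')
--
--     def block(p, group):
--         head = [f"#### {p} Priority ({len(group)} test cases)"]
--         body = [line
--                 for tc in group[:8]
--                 for line in (f"- **[{tc.get('id', 'N/A')}]** {tc.get('title', 'Untitled')[:100]}",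
--                              f"  📁 Section: {tc.get('section_hierarchy') or tc.get('section', 'General')}")]
--         tail = ([f"  ... and {len(group) - 8} more {p.lower()} priority test cases"]
--                 if len(group) > 8 else [])
--         return head + body + tail + [""]
--
--     lines = ["### Test Cases Organized by Priority", ""]
--     for p in ('Critical', 'High', 'Medium', 'Low'):
--         if p == 'Medium':
--             group = [tc for tc in test_cases if label(tc) not in ('Critical', 'High', 'Low')]
--         else:
--             group = [tc for tc in test_cases if label(tc) == p]
--         if group:
--             lines += block(p, group)
--     lines.append(f"**Total Available Test Cases: {len(test_cases)}**")
--     return "\n".join(lines)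
-- ===== Notes on version B (the rewrite author's own statement) =====
-- stated objective: simpler
-- what changed: Replaces the mutable four-key priority dict built in one pass (plus a summing of all group lengths) by direct per-priority filter comprehensions in the fixed order, with Medium as negated membership so unknown labels fold in, and uses len(test_cases) for the total.
import Mathlib
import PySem

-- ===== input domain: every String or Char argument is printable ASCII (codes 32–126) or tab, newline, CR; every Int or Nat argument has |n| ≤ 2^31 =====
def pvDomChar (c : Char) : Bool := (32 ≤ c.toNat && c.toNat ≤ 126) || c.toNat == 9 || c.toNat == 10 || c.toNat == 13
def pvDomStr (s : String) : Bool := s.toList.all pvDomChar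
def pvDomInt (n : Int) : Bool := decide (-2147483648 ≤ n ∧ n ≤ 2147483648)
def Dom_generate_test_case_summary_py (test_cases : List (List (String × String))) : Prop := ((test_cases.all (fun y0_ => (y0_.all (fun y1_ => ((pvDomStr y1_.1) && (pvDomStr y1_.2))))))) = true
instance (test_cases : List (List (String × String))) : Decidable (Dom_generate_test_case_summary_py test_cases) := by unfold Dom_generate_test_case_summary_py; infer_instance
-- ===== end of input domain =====

-- B replaces A's mutable four-key priority dict (one grouping pass + summed group lengths) by direct
-- per-priority filters in the fixed order (Medium = negated membership) and uses len(test_cases) as the total.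

-- ===== PORT A =====
-- tc.get(k, d)
def tcGetA (tc : List (String × String)) (k d : String) : String :=
  ((PySem.Dict.mk tc).get? k).getD d

-- tc.get('section_hierarchy') or tc.get('section', 'General')  ('or' takes the right side on None or '')
def sectionOfA (tc : List (String × String)) : String :=
  match (PySem.Dict.mk tc).get? "section_hierarchy" with
  | some s => if s = "" then tcGetA tc "section" "General" else s
  | none => tcGetA tc "section" "General"

-- the loop body of A's grouping pass
def groupStepA (d : PySem.Dict String (List (List (String × String)))) (tc : List (String × String)) :
    PySem.Dict String (List (List (String × String))) :=
  let priority := tcGetA tc "priority_label" "Medium"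
  if d.contains priority then d.modify priority [] (· ++ [tc])
  else d.modify "Medium" [] (· ++ [tc])

-- the two lines appended for one test case
def renderTcA (lines : List String) (tc : List (String × String)) : List String :=
  let test_id := tcGetA tc "id" "N/A"
  let title := PySem.Str.slice (tcGetA tc "title" "Untitled") none (some 100)
  let lines := lines ++ ["- **[" ++ test_id ++ "]** " ++ title]
  lines ++ ["  📁 Section: " ++ sectionOfA tc]

-- the body of A's `for priority in ['Critical','High','Medium','Low']` loop
def renderPriorityA (groups : PySem.Dict String (List (List (String × String))))
    (lines : List String) (priority : String) : List String :=
  let test_list := groups.getD priority []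
  if test_list ≠ [] then
    let lines := lines ++ ["#### " ++ priority ++ " Priority (" ++ PySem.Int.toStr test_list.length ++ " test cases)"]
    let lines := (PySem.List.slice test_list none (some 8)).foldl renderTcA lines
    let lines := if 8 < test_list.length then
        lines ++ ["  ... and " ++ PySem.Int.toStr ((test_list.length : Int) - 8) ++ " more " ++ PySem.Str.lower priority ++ " priority test cases"]
      else lines
    lines ++ [""]
  else lines

def generate_test_case_summary_py (test_cases : List (List (String × String))) : String :=
  let priority_groups := test_cases.foldl groupStepA
    (PySem.Dict.ofList [("Critical", []), ("High", []), ("Medium", []), ("Low", [])])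
  let lines : List String := []
  let lines := lines ++ ["### Test Cases Organized by Priority"]
  let lines := lines ++ [""]
  let lines := ["Critical", "High", "Medium", "Low"].foldl (renderPriorityA priority_groups) lines
  let total := (priority_groups.values.map (fun tests => (tests.length : Int))).sum
  let lines := lines ++ ["**Total Available Test Cases: " ++ PySem.Int.toStr total ++ "**"]
  PySem.Str.join "\n" lines

-- ===== PORT B =====
-- tc.get('priority_label', 'Medium')
def labelB (tc : List (String × String)) : String :=
  ((PySem.Dict.mk tc).get? "priority_label").getD "Medium"

-- the two lines of the inner generator (id/title line, section line)
def bItem (tc : List (String × String)) : List String :=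
  ["- **[" ++ (((PySem.Dict.mk tc).get? "id").getD "N/A") ++ "]** "
      ++ PySem.Str.slice (((PySem.Dict.mk tc).get? "title").getD "Untitled") none (some 100),
   "  📁 Section: " ++ (match (PySem.Dict.mk tc).get? "section_hierarchy" with
      | some s => if s = "" then ((PySem.Dict.mk tc).get? "section").getD "General" else s
      | none => ((PySem.Dict.mk tc).get? "section").getD "General")]

-- head + body + tail + [""]  of B's block() helper
def blockB (p : String) (group : List (List (String × String))) : List String :=
  ["#### " ++ p ++ " Priority (" ++ PySem.Int.toStr group.length ++ " test cases)"]
    ++ (PySem.List.slice group none (some 8)).flatMap bItem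
    ++ (if 8 < group.length then
          ["  ... and " ++ PySem.Int.toStr ((group.length : Int) - 8) ++ " more " ++ PySem.Str.lower p ++ " priority test cases"]
        else [])
    ++ [""]

-- the comprehension picking p's group straight from the input
def groupB (test_cases : List (List (String × String))) (p : String) : List (List (String × String)) :=
  if p = "Medium" then
    test_cases.filter (fun tc => !(["Critical", "High", "Low"].contains (labelB tc)))
  else
    test_cases.filter (fun tc => labelB tc == p)

def generate_test_case_summary_py_alt (test_cases : List (List (String × String))) : String :=
  let lines := ["### Test Cases Organized by Priority", ""]
  let lines := ["Critical", "High", "Medium", "Low"].foldl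
    (fun lines p =>
      let group := groupB test_cases p
      if group ≠ [] then lines ++ blockB p group else lines) lines
  let lines := lines ++ ["**Total Available Test Cases: " ++ PySem.Int.toStr (test_cases.length : Int) ++ "**"]
  PySem.Str.join "\n" lines

-- ===== PRECONDITION & SPEC =====
def Spec_generate_test_case_summary_py (test_cases : List (List (String × String))) (out : String) : Prop := out = generate_test_case_summary_py_alt test_cases
instance (test_cases : List (List (String × String))) (out : String) : Decidable (Spec_generate_test_case_summary_py test_cases out) := by unfold Spec_generate_test_case_summary_py; infer_instance

-- ===== CLAIM (what is proved, stated in full; the proofs are below) =====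
def Claim_equal_generate_test_case_summary_py : Prop := ∀ (test_cases : List (List (String × String))), Dom_generate_test_case_summary_py test_cases → Spec_generate_test_case_summary_py test_cases (generate_test_case_summary_py test_cases)

-- ===== LEMMAS AND PROOFS =====

-- A's grouping fold, started from the four-key dict, lands exactly on B's four filters.
theorem groupFold (l : List (List (String × String)))
    (a b c e : List (List (String × String))) :
    l.foldl groupStepA (PySem.Dict.mk [("Critical", a), ("High", b), ("Medium", c), ("Low", e)]) =
      PySem.Dict.mk [("Critical", a ++ groupB l "Critical"), ("High", b ++ groupB l "High"),
                     ("Medium", c ++ groupB l "Medium"), ("Low", e ++ groupB l "Low")] := by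
  induction l generalizing a b c e with
  | nil => simp [groupB]
  | cons x l ih =>
    have hlab : tcGetA x "priority_label" "Medium" = labelB x := rfl
    by_cases h1 : labelB x = "Critical"
    · simp [List.foldl, groupStepA, hlab, h1, PySem.Dict.contains, PySem.Dict.modify,
        PySem.Dict.insert, PySem.Dict.getD, PySem.Dict.get?, ih, groupB, List.filter]
    · by_cases h2 : labelB x = "High"
      · simp [List.foldl, groupStepA, hlab, h2, PySem.Dict.contains, PySem.Dict.modify,
          PySem.Dict.insert, PySem.Dict.getD, PySem.Dict.get?, ih, groupB, List.filter]
      · by_cases h3 : labelB x = "Low"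
        · simp [List.foldl, groupStepA, hlab, h3, PySem.Dict.contains, PySem.Dict.modify,
            PySem.Dict.insert, PySem.Dict.getD, PySem.Dict.get?, ih, groupB, List.filter]
        · by_cases h4 : labelB x = "Medium"
          · simp [List.foldl, groupStepA, hlab, h4, PySem.Dict.contains, PySem.Dict.modify,
              PySem.Dict.insert, PySem.Dict.getD, PySem.Dict.get?, ih, groupB, List.filter]
          · simp [List.foldl, groupStepA, hlab, h1, h2, h3, PySem.Dict.contains,
              PySem.Dict.modify, PySem.Dict.insert, PySem.Dict.getD, PySem.Dict.get?, ih,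
              groupB, List.filter, Ne.symm h1, Ne.symm h2, Ne.symm h3, Ne.symm h4,
              beq_eq_false_iff_ne.mpr h1, beq_eq_false_iff_ne.mpr h2, beq_eq_false_iff_ne.mpr h3]

-- per test case, A appends exactly B's two lines
theorem renderTcA_eq (lines : List String) (tc : List (String × String)) :
    renderTcA lines tc = lines ++ bItem tc := by
  simp [renderTcA, bItem, tcGetA, sectionOfA]

-- A's per-priority loop body, fed group g, emits B's block
theorem renderPriorityA_eq (groups : PySem.Dict String (List (List (String × String))))
    (lines : List String) (p : String) (g : List (List (String × String)))
    (hg : groups.getD p [] = g) :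
    renderPriorityA groups lines p = if g ≠ [] then lines ++ blockB p g else lines := by
  have hfold : ∀ (acc : List String) (xs : List (List (String × String))),
      xs.foldl renderTcA acc = acc ++ xs.flatMap bItem := by
    intro acc xs
    have hfn : renderTcA = fun acc tc => acc ++ bItem tc := by
      funext a x; exact renderTcA_eq a x
    rw [hfn, PySem.List.foldl_append_eq_flatMap]
  simp only [renderPriorityA, hg, blockB, hfold]
  split_ifs <;> simp_all

-- the four filters partition the input, so their lengths sum to len(test_cases)
theorem groupB_partition (l : List (List (String × String))) :
    (groupB l "Critical").length + (groupB l "High").length +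
      (groupB l "Medium").length + (groupB l "Low").length = l.length := by
  induction l with
  | nil => simp [groupB]
  | cons x l ih =>
    by_cases h1 : labelB x = "Critical"
    · simp [groupB, h1] at ih ⊢; omega
    · by_cases h2 : labelB x = "High"
      · simp [groupB, h2] at ih ⊢; omega
      · by_cases h3 : labelB x = "Low"
        · simp [groupB, h3] at ih ⊢; omega
        · simp [groupB, h1, h2, h3, beq_eq_false_iff_ne.mpr h1,
            beq_eq_false_iff_ne.mpr h2, beq_eq_false_iff_ne.mpr h3] at ih ⊢; omega

-- ===== VERDICT (by name: the statement is the Claim_ definition above) =====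
theorem generate_test_case_summary_py_spec : Claim_equal_generate_test_case_summary_py := by
  intro tcs _
  unfold Spec_generate_test_case_summary_py
  simp only [generate_test_case_summary_py, generate_test_case_summary_py_alt]
  rw [show (PySem.Dict.ofList [("Critical", ([] : List (List (String × String)))), ("High", []), ("Medium", []), ("Low", [])]) = PySem.Dict.mk [("Critical", []), ("High", []), ("Medium", []), ("Low", [])] from rfl]
  rw [groupFold tcs [] [] [] []]
  simp only [List.nil_append]
  have hC : (PySem.Dict.mk [("Critical", groupB tcs "Critical"), ("High", groupB tcs "High"), ("Medium", groupB tcs "Medium"), ("Low", groupB tcs "Low")]).getD "Critical" [] = groupB tcs "Critical" := by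
    simp [PySem.Dict.getD, PySem.Dict.get?, List.find?]
  have hH : (PySem.Dict.mk [("Critical", groupB tcs "Critical"), ("High", groupB tcs "High"), ("Medium", groupB tcs "Medium"), ("Low", groupB tcs "Low")]).getD "High" [] = groupB tcs "High" := by
    simp [PySem.Dict.getD, PySem.Dict.get?, List.find?]
  have hM : (PySem.Dict.mk [("Critical", groupB tcs "Critical"), ("High", groupB tcs "High"), ("Medium", groupB tcs "Medium"), ("Low", groupB tcs "Low")]).getD "Medium" [] = groupB tcs "Medium" := by
    simp [PySem.Dict.getD, PySem.Dict.get?, List.find?]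
  have hL : (PySem.Dict.mk [("Critical", groupB tcs "Critical"), ("High", groupB tcs "High"), ("Medium", groupB tcs "Medium"), ("Low", groupB tcs "Low")]).getD "Low" [] = groupB tcs "Low" := by
    simp [PySem.Dict.getD, PySem.Dict.get?, List.find?]
  have hV : ((PySem.Dict.mk [("Critical", groupB tcs "Critical"), ("High", groupB tcs "High"), ("Medium", groupB tcs "Medium"), ("Low", groupB tcs "Low")]).values.map (fun tests => ((tests.length : Nat) : Int))).sum = ((tcs.length : Nat) : Int) := by
    have hpart := groupB_partition tcs
    simp [PySem.Dict.values]
    omega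
  simp only [List.foldl]
  rw [renderPriorityA_eq _ _ _ _ hC, renderPriorityA_eq _ _ _ _ hH,
      renderPriorityA_eq _ _ _ _ hM, renderPriorityA_eq _ _ _ _ hL, hV]
  simp
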